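-- pv_equiv track=rewrite | github.com/HarmvandenBrand/NC2 | NC2_3_kmeans.py | maxColumn
-- ===== SOURCE A (Python) =====
-- def maxColumn(my_list):
--
--     m = len(my_list)
--     n = len(my_list[0])
--
--     list2 = []  # stores the column wise maximas
--     for col in range(n):  # iterate over all columns
--         col_max = my_list[0][col]  # assume the first element of the column(the top most) is the maximum
--         for row in range(1, m):  # iterate over the column(top to down)
--
--             col_max = max(col_max, my_list[row][col])
--
--         list2.append(col_max)
--     return list2
-- ===== SOURCE B (Python) =====
-- def maxColumn(my_list):
--     # Row-major sweep: keep a vector of partial column maxima and fold each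
--     # following row into it pointwise.
--     result = list(my_list[0])
--     for row in my_list[1:]:
--         result = [max(a, b) for a, b in zip(result, row)]
--     return result
-- ===== Notes on version B (the rewrite author's own statement) =====
-- stated objective: alternative
-- what changed: Replaces the column-major double loop (scalar running max with per-element index arithmetic my_list[row][col]) by a single row-major sweep that folds each row pointwise (zip + max list comprehension) into a vector of partial column maxima, avoiding repeated indexing.
import Mathlib
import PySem

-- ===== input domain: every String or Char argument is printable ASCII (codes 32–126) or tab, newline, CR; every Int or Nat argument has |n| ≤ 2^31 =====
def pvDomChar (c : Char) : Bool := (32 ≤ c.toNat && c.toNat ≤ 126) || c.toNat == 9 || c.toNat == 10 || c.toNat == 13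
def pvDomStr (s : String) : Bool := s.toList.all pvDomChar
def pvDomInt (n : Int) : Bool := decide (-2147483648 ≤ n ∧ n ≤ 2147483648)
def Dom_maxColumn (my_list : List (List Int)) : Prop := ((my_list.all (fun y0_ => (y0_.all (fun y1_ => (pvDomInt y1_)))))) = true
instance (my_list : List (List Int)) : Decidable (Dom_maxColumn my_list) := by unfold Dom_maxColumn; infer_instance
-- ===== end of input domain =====

-- B replaces A's column-major double loop by a single row-major sweep folding each
-- row pointwise into a vector of partial column maxima (objective: alternative).

-- ===== PORT A =====
def maxColumn (my_list : List (List Int)) : List Int :=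
  let m : Int := my_list.length
  let n : Int := (PySem.List.pyGetD my_list 0 []).length
  (PySem.List.pyRange 0 n 1).foldl (fun list2 col =>
    let col_max0 := PySem.List.pyGetD (PySem.List.pyGetD my_list 0 []) col 0
    let col_max := (PySem.List.pyRange 1 m 1).foldl (fun cm row =>
      max cm (PySem.List.pyGetD (PySem.List.pyGetD my_list row []) col 0)) col_max0
    list2 ++ [col_max]) []

-- ===== PORT B =====
def maxColumn_alt (my_list : List (List Int)) : List Int :=
  match my_list with
  | [] => []  -- Python B raises IndexError here (outside Pre_)
  | first :: rest => rest.foldl (fun result row => List.zipWith max result row) first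

-- ===== PRECONDITION & SPEC =====
-- Pre_ excludes exactly the inputs where A raises IndexError: the empty matrix and
-- matrices with some row shorter than the first row.
def Pre_maxColumn (my_list : List (List Int)) : Prop :=
  my_list ≠ [] ∧ ∀ r ∈ my_list, (my_list.headD []).length ≤ r.length
instance (my_list : List (List Int)) : Decidable (Pre_maxColumn my_list) := by
  unfold Pre_maxColumn; infer_instance
def pvWitness_maxColumn : List (List Int) := [[1, 5, 2], [4, 0, 3]]

def Spec_maxColumn (my_list : List (List Int)) (out : List Int) : Prop := out = maxColumn_alt my_list
instance (my_list : List (List Int)) (out : List Int) : Decidable (Spec_maxColumn my_list out) := by unfold Spec_maxColumn; infer_instance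

-- ===== CLAIM (what is proved, stated in full; the proofs are below) =====
def Claim_equal_maxColumn : Prop := ∀ (my_list : List (List Int)), Dom_maxColumn my_list → Pre_maxColumn my_list → Spec_maxColumn my_list (maxColumn my_list)

-- ===== LEMMAS AND PROOFS =====

-- B's fold characterised pointwise, by induction on the remaining rows.
lemma alt_char (rest : List (List Int)) : ∀ (first : List Int),
    (∀ r ∈ rest, first.length ≤ r.length) →
    rest.foldl (fun result row => List.zipWith max result row) first
      = (List.range first.length).map
          (fun k : Nat => rest.foldl
            (fun cm r => max cm (PySem.List.pyGetD r (k : Int) 0))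
            (PySem.List.pyGetD first (k : Int) 0)) := by
  induction rest with
  | nil =>
      intro first _
      simp only [List.foldl_nil]
      apply List.ext_getElem
      · simp
      · intro k h1 h2
        simp [PySem.List.pyGetD_natCast, List.getD_eq_getElem?_getD]
        simp at h2
        simp [List.getElem?_eq_getElem h2]
  | cons r rest ih =>
      intro first h
      have hlen : first.length ≤ r.length := h r (by simp)
      have hz : (List.zipWith max first r).length = first.length := by
        simp [List.length_zipWith]; omega
      simp only [List.foldl_cons]
      rw [ih (List.zipWith max first r) (by intro r' hr'; rw [hz]; exact h r' (by simp [hr']))]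
      rw [hz]
      apply List.map_congr_left
      intro k hk
      simp only [List.mem_range] at hk
      congr 1
      have hk' : k < r.length := by omega
      simp [PySem.List.pyGetD_natCast, List.getD_eq_getElem?_getD,
        List.getElem?_eq_getElem hk, List.getElem?_eq_getElem hk',
        List.getElem?_eq_getElem (show k < (List.zipWith max first r).length by omega)]

-- A's outer loop is a map over the columns; its inner loop is a fold over the tail rows.
lemma a_char (first : List Int) (rest : List (List Int)) :
    maxColumn (first :: rest)
      = (List.range first.length).map
          (fun k : Nat => rest.foldl
            (fun cm r => max cm (PySem.List.pyGetD r (k : Int) 0))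
            (PySem.List.pyGetD first (k : Int) 0)) := by
  unfold maxColumn
  simp only [PySem.List.pyGetD_zero_cons]
  rw [PySem.List.foldl_append_singleton_eq_map]
  rw [PySem.List.pyRange_zero_nat]
  rw [List.map_map]
  apply List.map_congr_left
  intro k hk
  simp only [Function.comp]
  rw [PySem.List.foldl_pyRange_pyGetD' (first :: rest) ([] : List Int)
    (fun cm r => max cm (PySem.List.pyGetD r (k : Int) 0))
    (PySem.List.pyGetD first (k : Int) 0) (by omega : (0:Int) ≤ 1)]
  simp

-- ===== VERDICT (by name: the statement is the Claim_ definition above) =====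
theorem maxColumn_spec : Claim_equal_maxColumn := by
  intro my_list _ hpre
  obtain ⟨hne, hlen⟩ := hpre
  match my_list with
  | [] => exact absurd rfl hne
  | first :: rest =>
      show maxColumn (first :: rest) = maxColumn_alt (first :: rest)
      rw [a_char]
      show _ = rest.foldl (fun result row => List.zipWith max result row) first
      rw [alt_char rest first (by intro r hr; exact hlen r (by simp [hr]))]
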